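-- pv_equiv track=rewrite | github.com/Shoyeb45/MiniProjects | PythonAssign/ContainerQuestion/authenticationSys.py | pswdUserName
-- ===== SOURCE A (Python) =====
-- def pswdUserName(username, s):
--     i = 0
--     while(i <= len(username)-1):
--         for j in range(0, len(s)-1):
--             if username[i] == s[j]:
--                 cnt = 1
--                 for k in range(j+1, len(s)):
--                     if s[j] == s[k]:
--                         cnt += 1
--                     else:
--                         break
--
--                 if cnt > 3:
--                     return False
--         i += 1
--
--     return True
-- ===== SOURCE B (Python) =====
-- def pswdUserName(username, s):
--     run = 0
--     prev = None
--     for ch in s: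
--         run = run + 1 if ch == prev else 1
--         prev = ch
--         if run == 4 and ch in username:
--             return False
--     return True
-- ===== Notes on version B (the rewrite author's own statement) =====
-- stated objective: faster
-- what changed: Replaces A's triple loop (every username char x every s position x rescan of the run) by a single left-to-right pass over s maintaining the current run length and checking membership only when a run reaches 4.
import Mathlib
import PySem

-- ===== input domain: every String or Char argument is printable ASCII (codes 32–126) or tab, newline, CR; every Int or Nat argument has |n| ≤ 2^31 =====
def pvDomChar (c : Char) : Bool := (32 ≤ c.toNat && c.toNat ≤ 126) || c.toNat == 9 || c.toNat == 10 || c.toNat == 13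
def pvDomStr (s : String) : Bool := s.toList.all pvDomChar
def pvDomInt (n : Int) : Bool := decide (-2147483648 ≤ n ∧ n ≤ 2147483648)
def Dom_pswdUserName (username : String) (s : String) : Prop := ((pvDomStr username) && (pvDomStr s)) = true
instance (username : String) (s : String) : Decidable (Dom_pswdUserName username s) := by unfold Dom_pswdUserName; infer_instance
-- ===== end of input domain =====

-- ===== PORT A =====
-- B is a single pass over s; A rescans the run for every matching position of every username char.
-- (one honest line) B: one-pass run-length scan instead of A's triple nested loop; measurably faster.

-- inner k-loop of A: count of consecutive chars equal to c at the head of the list (break on mismatch)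
def pvA_run (c : Char) : List Char → Int
  | [] => 0
  | x :: xs => if x = c then 1 + pvA_run c xs else 0

-- the j-loop of A for one username char c (js = range(0, len(s)-1)); true = "return False" fired
def pvA_jloop (sc : List Char) (c : Char) : List Nat → Bool
  | [] => false
  | j :: js =>
    if c = sc.getD j ' ' then
      if 3 < 1 + pvA_run (sc.getD j ' ') (sc.drop (j + 1)) then true
      else pvA_jloop sc c js
    else pvA_jloop sc c js

-- the outer while loop over username's chars
def pvA_iloop (sc : List Char) : List Char → Bool
  | [] => true
  | c :: cs =>
    if pvA_jloop sc c (List.range (sc.length - 1)) then false else pvA_iloop sc cs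

def pswdUserName (username : String) (s : String) : Bool :=
  pvA_iloop s.toList username.toList

-- ===== PORT B =====
-- B's loop: run = current run length, prev = previous char; run hitting 4 with prev in username => False
def pvB_loop (u : List Char) : List Char → Option Char → Nat → Bool
  | [], _, _ => true
  | ch :: rest, prev, run =>
    let r := if prev = some ch then run + 1 else 1
    if r == 4 && u.contains ch then false else pvB_loop u rest (some ch) r

def pswdUserName_alt (username : String) (s : String) : Bool :=
  pvB_loop username.toList s.toList none 0

-- ===== PRECONDITION & SPEC =====
def Spec_pswdUserName (username : String) (s : String) (out : Bool) : Prop := out = pswdUserName_alt username s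
instance (username : String) (s : String) (out : Bool) : Decidable (Spec_pswdUserName username s out) := by unfold Spec_pswdUserName; infer_instance

-- ===== CLAIM =====
def Claim_equal_pswdUserName : Prop := ∀ (username : String) (s : String), Dom_pswdUserName username s → Spec_pswdUserName username s (pswdUserName username s)

-- ===== LEMMAS AND PROOFS =====
-- Common specification: s contains 4 consecutive equal chars whose char occurs in username.
def pvHasRun (u sc : List Char) : Prop := ∃ c ∈ u, List.replicate 4 c <:+: sc

lemma pvA_run_nonneg (c : Char) (l : List Char) : 0 ≤ pvA_run c l := by
  induction l with
  | nil => simp [pvA_run]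
  | cons x xs ih => simp only [pvA_run]; split <;> omega

lemma pvA_run_ge (c : Char) (n : Nat) (l : List Char) :
    (n : Int) ≤ pvA_run c l ↔ List.replicate n c <+: l := by
  induction n generalizing l with
  | zero => simpa using pvA_run_nonneg c l
  | succ n ih =>
    cases l with
    | nil =>
      simp only [pvA_run, List.replicate_succ]
      constructor
      · intro h; omega
      · intro h; exact absurd h (by simp)
    | cons x xs =>
      simp only [pvA_run, List.replicate_succ, List.cons_prefix_cons]
      split
      · rename_i hx
        subst hx
        rw [← ih]
        constructor
        · intro h; exact ⟨rfl, by omega⟩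
        · rintro ⟨-, h⟩; omega
      · rename_i hx
        constructor
        · intro h; have := pvA_run_nonneg c xs; omega
        · rintro ⟨h, -⟩; exact absurd h.symm hx

lemma pvA_jloop_iff (sc : List Char) (c : Char) (js : List Nat) :
    pvA_jloop sc c js = true ↔
      ∃ j ∈ js, c = sc.getD j ' ' ∧ 3 < 1 + pvA_run (sc.getD j ' ') (sc.drop (j + 1)) := by
  induction js with
  | nil => simp [pvA_jloop]
  | cons j js ih =>
    simp only [pvA_jloop, List.mem_cons]
    split
    · rename_i h1
      split
      · rename_i h2
        simp only [true_iff]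
        exact ⟨j, Or.inl rfl, h1, h2⟩
      · rename_i h2
        rw [ih]
        constructor
        · rintro ⟨k, hk, h⟩; exact ⟨k, Or.inr hk, h⟩
        · rintro ⟨k, hk | hk, h⟩
          · subst hk; exact absurd h.2 h2
          · exact ⟨k, hk, h⟩
    · rename_i h1
      rw [ih]
      constructor
      · rintro ⟨k, hk, h⟩; exact ⟨k, Or.inr hk, h⟩
      · rintro ⟨k, hk | hk, h⟩
        · subst hk; exact absurd h.1 h1
        · exact ⟨k, hk, h⟩

lemma pvA_jloop_char (sc : List Char) (c : Char) :
    pvA_jloop sc c (List.range (sc.length - 1)) = true ↔ List.replicate 4 c <:+: sc := by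
  rw [pvA_jloop_iff]
  constructor
  · rintro ⟨j, hj, hc, hcnt⟩
    rw [List.mem_range] at hj
    have hjlen : j < sc.length := by omega
    rw [List.getD_eq_getElem sc ' ' hjlen] at hc hcnt
    have h3 : List.replicate 3 (sc[j]) <+: sc.drop (j + 1) := by
      rw [← pvA_run_ge]; push_cast; omega
    have hdrop : sc.drop j = sc[j] :: sc.drop (j + 1) := List.drop_eq_getElem_cons hjlen
    have h4 : List.replicate 4 c <+: sc.drop j := by
      rw [hdrop, hc, show (4 : Nat) = 3 + 1 from rfl, List.replicate_succ,
        List.cons_prefix_cons]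
      exact ⟨rfl, h3⟩
    exact List.infix_iff_prefix_suffix.mpr ⟨sc.drop j, h4, List.drop_suffix j sc⟩
  · intro h
    obtain ⟨t, hpre, hsuf⟩ := List.infix_iff_prefix_suffix.mp h
    obtain ⟨j, rfl⟩ : ∃ j, t = sc.drop j := ⟨sc.length - t.length, (List.suffix_iff_eq_drop.mp hsuf)⟩
    have hlen : 4 ≤ (sc.drop j).length := by
      have := hpre.length_le; simpa using this
    have hjlen : j < sc.length := by simp at hlen; omega
    have hdrop : sc.drop j = sc[j] :: sc.drop (j + 1) := List.drop_eq_getElem_cons hjlen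
    rw [hdrop, show (4 : Nat) = 3 + 1 from rfl, List.replicate_succ, List.cons_prefix_cons] at hpre
    obtain ⟨hc, hpre3⟩ := hpre
    refine ⟨j, ?_, ?_, ?_⟩
    · rw [List.mem_range]
      simp only [List.length_drop] at hlen
      omega
    · rw [List.getD_eq_getElem sc ' ' hjlen]; exact hc
    · have := (pvA_run_ge (sc[j]) 3 (sc.drop (j + 1))).mpr (hc ▸ hpre3)
      rw [List.getD_eq_getElem sc ' ' hjlen]
      push_cast at this ⊢
      omega

lemma pvA_iloop_iff (sc us : List Char) :
    pvA_iloop sc us = true ↔ ¬ pvHasRun us sc := by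
  induction us with
  | nil => simp [pvA_iloop, pvHasRun]
  | cons c cs ih =>
    simp only [pvA_iloop, pvHasRun, List.mem_cons]
    split
    · rename_i h
      rw [pvA_jloop_char] at h
      constructor
      · intro hfalse; exact absurd hfalse (by simp)
      · intro hn; exact absurd ⟨c, Or.inl rfl, h⟩ hn
    · rename_i h
      have hni : ¬ List.replicate 4 c <:+: sc := by
        rw [← pvA_jloop_char]; simp [h]
      rw [ih, pvHasRun]
      constructor
      · rintro hn ⟨d, hd | hd, hr⟩
        · subst hd; exact hni hr
        · exact hn ⟨d, hd, hr⟩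
      · rintro hn ⟨d, hd, hr⟩; exact hn ⟨d, Or.inr hd, hr⟩

-- a window of 4 equal chars cannot start inside a short (≤3) pad of p's followed by ch ≠ p
lemma pvPref_pad (p ch c : Char) (hne : ch ≠ p) (rest : List Char) :
    ∀ k, 1 ≤ k → k ≤ 3 → ¬ (List.replicate 4 c <+: List.replicate k p ++ ch :: rest) := by
  intro k h1 h3 h
  interval_cases k <;>
    simp only [List.replicate, List.cons_append, List.nil_append, List.cons_prefix_cons] at h
  · exact hne (h.2.1.symm.trans h.1)
  · exact hne (h.2.2.1.symm.trans h.1)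
  · exact hne (h.2.2.2.1.symm.trans h.1)

lemma pvInfix_pad (p ch : Char) (hne : ch ≠ p) (rest : List Char) (c : Char) :
    ∀ m, m ≤ 3 →
      ((List.replicate 4 c <:+: (List.replicate m p ++ ch :: rest)) ↔
        List.replicate 4 c <:+: ch :: rest) := by
  intro m
  induction m with
  | zero => intro _; simp
  | succ n ih =>
    intro hm
    rw [show List.replicate (n + 1) p ++ ch :: rest = p :: (List.replicate n p ++ ch :: rest) from
        by rw [List.replicate_succ]; simp,
      List.infix_cons_iff, ih (by omega)]
    constructor
    · rintro (hpre | h)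
      · exfalso
        refine pvPref_pad p ch c hne rest (n + 1) (by omega) hm ?_
        rw [show p :: (List.replicate n p ++ ch :: rest) = List.replicate (n + 1) p ++ ch :: rest
            from by rw [List.replicate_succ, List.cons_append]] at hpre
        exact hpre
      · exact h
    · exact Or.inr

lemma pvB_inv (u : List Char) (rest : List Char) (p : Char) (r : Nat)
    (h1 : 1 ≤ r) (h4 : 4 ≤ r → p ∉ u) :
    (pvB_loop u rest (some p) r = true ↔
      ¬ ∃ c ∈ u, List.replicate 4 c <:+: (List.replicate (min r 3) p ++ rest)) := by
  induction rest generalizing p r with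
  | nil =>
    simp only [pvB_loop, true_iff]
    rintro ⟨c, hc, hinf⟩
    have := hinf.length_le
    simp at this
  | cons ch rest ih =>
    simp only [pvB_loop]
    by_cases hch : ch = p
    · subst hch
      rw [if_pos rfl]
      by_cases hmem : (r + 1 == 4 && u.contains ch) = true
      · rw [if_pos hmem]
        simp only [Bool.and_eq_true, beq_iff_eq, List.contains_eq_mem, decide_eq_true_eq] at hmem
        obtain ⟨hr4, hin⟩ := hmem
        have hr : r = 3 := by omega
        subst hr
        constructor
        · intro hfalse; exact absurd hfalse (by simp)
        · intro hn
          exact absurd ⟨ch, hin, List.IsPrefix.isInfix ⟨rest, rfl⟩⟩ hn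
      · rw [if_neg hmem]
        simp only [Bool.and_eq_true, beq_iff_eq, List.contains_eq_mem, decide_eq_true_eq,
          not_and_or] at hmem
        have h4' : 4 ≤ r + 1 → ch ∉ u := by
          intro hge
          rcases hmem with h | h
          · exact h4 (by omega)
          · exact fun hc => h hc
        rw [ih ch (r + 1) (by omega) h4']
        by_cases hr3 : r ≤ 2
        · have e1 : min r 3 = r := by omega
          have e2 : min (r + 1) 3 = r + 1 := by omega
          rw [e1, e2]
          have heq : List.replicate (r + 1) ch ++ rest = List.replicate r ch ++ ch :: rest := by
            rw [List.replicate_succ']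
            simp
          rw [heq]
        · have e1 : min r 3 = 3 := by omega
          have e2 : min (r + 1) 3 = 3 := by omega
          rw [e1, e2]
          have hpn : ch ∉ u := h4' (by omega)
          have heq : List.replicate 3 ch ++ ch :: rest = ch :: (List.replicate 3 ch ++ rest) := rfl
          rw [heq]
          refine not_congr (exists_congr fun c => and_congr_right fun hc => ?_)
          rw [List.infix_cons_iff]
          constructor
          · exact Or.inr
          · rintro (hpre | h)
            · exfalso
              rw [show (4 : Nat) = 3 + 1 from rfl, List.replicate_succ,
                List.cons_prefix_cons] at hpre
              exact hpn (hpre.1 ▸ hc)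
            · exact h
    · have hne : ¬ ((some p : Option Char) = some ch) := by
        intro h
        exact hch (Option.some.inj h).symm
      rw [if_neg hne]
      by_cases hmem : ((1 : Nat) == 4 && u.contains ch) = true
      · simp at hmem
      · rw [if_neg hmem]
        rw [ih ch 1 (by omega) (by omega)]
        rw [show List.replicate (min 1 3) ch ++ rest = ch :: rest from rfl]
        have hp := fun c => pvInfix_pad p ch hch rest c (min r 3) (by omega)
        refine not_congr (exists_congr fun c => and_congr_right fun hc => ?_)
        exact (hp c).symm

lemma pvB_iff (u l : List Char) :
    pvB_loop u l none 0 = true ↔ ¬ pvHasRun u l := by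
  cases l with
  | nil =>
    simp only [pvB_loop, pvHasRun, true_iff]
    rintro ⟨c, hc, hinf⟩
    have := hinf.length_le; simp at this
  | cons ch rest =>
    simp only [pvB_loop]
    have hne : ¬ ((none : Option Char) = some ch) := by simp
    rw [if_neg hne]
    by_cases hmem : ((1 : Nat) == 4 && u.contains ch) = true
    · simp at hmem
    · rw [if_neg hmem, pvB_inv u rest ch 1 (by omega) (by omega)]
      rw [show List.replicate (min 1 3) ch ++ rest = ch :: rest from rfl]
      rfl

-- ===== VERDICT (by name: the statement is the Claim_ definition above) =====
theorem pswdUserName_spec : Claim_equal_pswdUserName := by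
  intro username s _
  show pswdUserName username s = pswdUserName_alt username s
  rw [Bool.eq_iff_iff]
  unfold pswdUserName pswdUserName_alt
  rw [pvA_iloop_iff, pvB_iff]
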